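-- pv_equiv track=rewrite | github.com/liu9756/DualChain-SelfAg_prediction | scr/preprocessing.py | _pair_classII
-- ===== SOURCE A (Python) =====
-- def _pair_classII(tokens):
--     if not tokens:
--         return []
--     by_locus = {}
--     for t in tokens:
--         locus = t.split('*', 1)[0]  # DQA1, DQB1, DRA, DRB1, DPA1, DPB1 ...
--         by_locus.setdefault(locus, []).append(t)
--     pairs = set()
--
--     def _mk_pairs(a_key, b_key):
--         a = by_locus.get(a_key, [])
--         b = by_locus.get(b_key, [])
--         for x in a:
--             for y in b:
--                 pairs.add(f"{x}~{y}")
--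
--     _mk_pairs("DQA1", "DQB1")
--     _mk_pairs("DPA1", "DPB1")
--     _mk_pairs("DRA", "DRB1")
--
--     return sorted(pairs)
-- ===== SOURCE B (Python) =====
-- _ALPHA_BETA = {("DQA1", "DQB1"), ("DPA1", "DPB1"), ("DRA", "DRB1")}
--
-- def _pair_classII(tokens):
--     pairs = set()
--     for x in tokens:
--         for y in tokens:
--             if (x.split('*', 1)[0], y.split('*', 1)[0]) in _ALPHA_BETA:
--                 pairs.add(f"{x}~{y}")
--     return sorted(pairs)
-- ===== Notes on version B (the rewrite author's own statement) =====
-- stated objective: alternative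
-- what changed: B removes the by-locus grouping dict entirely: it brute-forces all ordered token pairs and keeps x~y exactly when the pair of locus prefixes is one of the three hard-coded alpha-beta locus pairs, collecting into a set and sorting; it trades A's group-then-cross-product structure for a direct quadratic pair scan.
import Mathlib
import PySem

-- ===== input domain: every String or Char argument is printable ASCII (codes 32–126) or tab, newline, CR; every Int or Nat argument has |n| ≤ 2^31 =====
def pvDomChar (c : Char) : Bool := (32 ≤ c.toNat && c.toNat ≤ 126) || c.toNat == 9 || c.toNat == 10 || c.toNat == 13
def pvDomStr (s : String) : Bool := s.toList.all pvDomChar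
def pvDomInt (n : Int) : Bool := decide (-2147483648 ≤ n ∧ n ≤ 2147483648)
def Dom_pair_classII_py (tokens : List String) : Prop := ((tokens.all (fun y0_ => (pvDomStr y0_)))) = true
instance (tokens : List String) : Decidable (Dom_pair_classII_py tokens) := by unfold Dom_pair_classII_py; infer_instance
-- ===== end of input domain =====

-- B drops A's by-locus grouping dict and instead brute-forces all ordered token pairs,
-- keeping x~y when the pair of locus prefixes is one of the three alpha-beta locus pairs; objective: alternative.

-- ===== PORT A =====
-- t.split('*', 1)[0] (split with sep ≠ "" always returns some nonempty list, so the defaults never fire)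
def locusOf (t : String) : String := ((PySem.Str.splitMax? t "*" 1).getD [t]).headD t

def pair_classII_py (tokens : List String) : List String :=
  if tokens = [] then []
  else
    -- by_locus.setdefault(locus, []).append(t)  ≡  d[locus] = d.get(locus, []) + [t]
    let by_locus : PySem.Dict String (List String) :=
      tokens.foldl (fun d t => d.modify (locusOf t) [] (· ++ [t])) PySem.Dict.empty
    let mk : PySem.Set String → String → String → PySem.Set String := fun pairs aK bK =>
      (by_locus.getD aK []).foldl (fun p x =>
        (by_locus.getD bK []).foldl (fun p y => PySem.Set.add p (x ++ "~" ++ y)) p) pairs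
    let pairs := mk (mk (mk PySem.Set.empty "DQA1" "DQB1") "DPA1" "DPB1") "DRA" "DRB1"
    PySem.List.sorted pairs (fun s => s) false

-- ===== PORT B =====
-- the module-level set literal _ALPHA_BETA
def alphaBeta : PySem.Set (String × String) :=
  PySem.Set.ofList [("DQA1", "DQB1"), ("DPA1", "DPB1"), ("DRA", "DRB1")]

def pair_classII_py_alt (tokens : List String) : List String :=
  let pairs := tokens.foldl (fun p x =>
    tokens.foldl (fun p y =>
      if PySem.Set.contains alphaBeta (locusOf x, locusOf y) then
        PySem.Set.add p (x ++ "~" ++ y)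
      else p) p) PySem.Set.empty
  PySem.List.sorted pairs (fun s => s) false

-- ===== PRECONDITION & SPEC =====
def Spec_pair_classII_py (tokens : List String) (out : List String) : Prop := out = pair_classII_py_alt tokens
instance (tokens : List String) (out : List String) : Decidable (Spec_pair_classII_py tokens out) := by unfold Spec_pair_classII_py; infer_instance

-- ===== CLAIM (what is proved, stated in full; the proofs are below) =====
def Claim_equal_pair_classII_py : Prop := ∀ (tokens : List String), Dom_pair_classII_py tokens → Spec_pair_classII_py tokens (pair_classII_py tokens)

-- ===== LEMMAS AND PROOFS =====

-- A's grouping dict looked up at key k is exactly the tokens with locus k.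
theorem getD_by_locus (tokens : List String) (k : String) :
    ((tokens.foldl (fun d t => d.modify (locusOf t) [] (· ++ [t])) PySem.Dict.empty).getD k [])
      = tokens.filter (fun t => locusOf t == k) := by
  have h1 : tokens.foldl (fun d t => d.modify (locusOf t) [] (· ++ [t])) PySem.Dict.empty
      = (tokens.map (fun t => (locusOf t, t))).foldl
          (fun d p => d.modify p.1 [] (· ++ [p.2])) PySem.Dict.empty := by
    rw [List.foldl_map]
  rw [h1, PySem.Dict.getD_foldl_modify_append, PySem.Dict.getD_empty, List.filter_map]
  simp [Function.comp_def]

-- a nested add loop over a × b is a bulk update with the list of formatted pairs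
theorem nested_add_eq_update (a b : List String) (p : PySem.Set String) :
    a.foldl (fun p x => b.foldl (fun p y => PySem.Set.add p (x ++ "~" ++ y)) p) p
      = PySem.Set.update p (a.flatMap fun x => b.map fun y => x ++ "~" ++ y) := by
  induction a generalizing p with
  | nil => simp [PySem.Set.update]
  | cons x xs ih =>
      simp only [List.foldl_cons, List.flatMap_cons, PySem.Set.update, List.foldl_append, ih,
        List.foldl_map]

-- a loop of bulk updates is one update with the flatMap
theorem foldl_update_eq_update (l : List String) (g : String → List String) (s : PySem.Set String) :
    l.foldl (fun s x => PySem.Set.update s (g x)) s = PySem.Set.update s (l.flatMap g) := by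
  induction l generalizing s with
  | nil => simp [PySem.Set.update]
  | cons x xs ih => simp only [List.foldl_cons, List.flatMap_cons, ih, PySem.Set.update_append]

-- the pair list A builds (concatenation of three products)
def prodOf (tokens : List String) (a b : String) : List String :=
  (tokens.filter (fun t => locusOf t == a)).flatMap fun x =>
    (tokens.filter (fun t => locusOf t == b)).map fun y => x ++ "~" ++ y

def aList (tokens : List String) : List String :=
  prodOf tokens "DQA1" "DQB1" ++ prodOf tokens "DPA1" "DPB1" ++ prodOf tokens "DRA" "DRB1"

-- the pair list B builds (filtered brute-force product)
def bList (tokens : List String) : List String :=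
  tokens.flatMap fun x => (tokens.filter
    (fun y => PySem.Set.contains alphaBeta (locusOf x, locusOf y))).map fun y => x ++ "~" ++ y

theorem mem_aList_iff (tokens : List String) (s : String) :
    s ∈ aList tokens ↔ s ∈ bList tokens := by
  simp only [aList, bList, prodOf, List.mem_append, List.mem_flatMap, List.mem_map,
    List.mem_filter, beq_iff_eq, PySem.Set.contains_eq_listContains, List.contains_eq_mem,
    alphaBeta, PySem.Set.mem_ofList, decide_eq_true_eq, List.mem_cons, List.not_mem_nil,
    or_false, Prod.mk.injEq]
  constructor
  · rintro ((h | h) | h) <;>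
    · obtain ⟨x, ⟨hx, hlx⟩, y, ⟨hy, hly⟩, rfl⟩ := h
      exact ⟨x, hx, y, ⟨hy, by simp [hlx, hly]⟩, rfl⟩
  · rintro ⟨x, hx, ⟨y, ⟨hy, hc⟩, rfl⟩⟩
    rcases hc with ⟨h1, h2⟩ | ⟨h1, h2⟩ | ⟨h1, h2⟩
    · exact Or.inl (Or.inl ⟨x, ⟨hx, h1⟩, y, ⟨hy, h2⟩, rfl⟩)
    · exact Or.inl (Or.inr ⟨x, ⟨hx, h1⟩, y, ⟨hy, h2⟩, rfl⟩)
    · exact Or.inr ⟨x, ⟨hx, h1⟩, y, ⟨hy, h2⟩, rfl⟩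

-- ===== VERDICT (by name: the statement is the Claim_ definition above) =====
theorem pair_classII_py_spec : Claim_equal_pair_classII_py := by
  intro tokens _
  show pair_classII_py tokens = pair_classII_py_alt tokens
  have hA : pair_classII_py tokens
      = PySem.List.sorted (PySem.Set.ofList (aList tokens)) (fun s => s) false := by
    unfold pair_classII_py
    by_cases h : tokens = []
    · subst h; rfl
    · simp only [if_neg h, getD_by_locus, nested_add_eq_update, aList, prodOf,
        ← PySem.Set.update_append]
      rfl
  have hB : pair_classII_py_alt tokens
      = PySem.List.sorted (PySem.Set.ofList (bList tokens)) (fun s => s) false := by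
    unfold pair_classII_py_alt
    have : ∀ x (p : PySem.Set String),
        tokens.foldl (fun p y =>
          if PySem.Set.contains alphaBeta (locusOf x, locusOf y) then
            PySem.Set.add p (x ++ "~" ++ y) else p) p
        = PySem.Set.update p ((tokens.filter
            (fun y => PySem.Set.contains alphaBeta (locusOf x, locusOf y))).map
              fun y => x ++ "~" ++ y) := by
      intro x p
      rw [PySem.List.foldl_if_eq_foldl_filter, PySem.Set.update, List.foldl_map]
    simp only [this, foldl_update_eq_update, bList, PySem.Set.update_empty]
  rw [hA, hB]
  rw [PySem.List.sorted_id_eq_sorted_id_iff_perm]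
  rw [List.perm_ext_iff_of_nodup (PySem.Set.nodup_ofList _) (PySem.Set.nodup_ofList _)]
  intro a
  simp only [PySem.Set.mem_ofList]
  exact mem_aList_iff tokens a
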